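-- pv_equiv track=rewrite | github.com/igorsterner/acs | acs/minimal_pairs/tools/other_processing.py | compute_alignments
-- ===== SOURCE A (Python) =====
-- def compute_alignments(
--     alignments_cs_lang2,
--     alignments_cs_lang1,
--     words_cs,
--     words_lang2,
--     words_lang1,
-- ):
--
--     alignments_cs_lang1_one_to_many = {i: [] for i in range(len(words_cs))}
--     for i, j in alignments_cs_lang1:
--         alignments_cs_lang1_one_to_many[i].append(j)
--
--     alignments_lang1_cs = [(v, k) for k, v in alignments_cs_lang1]
--     # alignments_lang1_cs = sorted(alignments_lang1_cs, key=lambda x: x[1])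
--     alignments_lang1_cs_one_to_many = {i: [] for i in range(len(words_lang1))}
--     for i, j in alignments_lang1_cs:
--         alignments_lang1_cs_one_to_many[i].append(j)
--
--     # alignments_cs_lang2 = sorted(alignments_cs_lang2, key=lambda x: x[1])
--     alignments_cs_lang2_one_to_many = {i: [] for i in range(len(words_cs))}
--     for i, j in alignments_cs_lang2:
--         alignments_cs_lang2_one_to_many[i].append(j)
--
--     alignments_lang2_cs = [(v, k) for k, v in alignments_cs_lang2]
--     # alignments_lang2_cs = sorted(alignments_lang2_cs, key=lambda x: x[1])
--     alignments_lang2_cs_one_to_many = {i: [] for i in range(len(words_lang2))}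
--     for i, j in alignments_lang2_cs:
--         alignments_lang2_cs_one_to_many[i].append(j)
--
--     return (
--         alignments_cs_lang2_one_to_many,
--         alignments_cs_lang1_one_to_many,
--         alignments_lang2_cs_one_to_many,
--         alignments_lang1_cs_one_to_many,
--     )
-- ===== SOURCE B (Python) =====
-- def compute_alignments(
--     alignments_cs_lang2,
--     alignments_cs_lang1,
--     words_cs,
--     words_lang2,
--     words_lang1,
-- ):
--     def group(pairs, n):
--         s = sorted(pairs, key=lambda p: p[0])
--         out = {i: [] for i in range(n)}
--         k = 0
--         while k < len(s):
--             i = s[k][0]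
--             start = k
--             while k < len(s) and s[k][0] == i:
--                 k += 1
--             out[i] = out[i] + [j for _, j in s[start:k]]
--         return out
--
--     return (
--         group(alignments_cs_lang2, len(words_cs)),
--         group(alignments_cs_lang1, len(words_cs)),
--         group([(j, i) for i, j in alignments_cs_lang2], len(words_lang2)),
--         group([(j, i) for i, j in alignments_cs_lang1], len(words_lang1)),
--     )
-- ===== Notes on version B (the rewrite author's own statement) =====
-- stated objective: alternative
-- what changed: B sorts each alignment list by source index (stable) and scans it run by run, assigning each run's targets to its key at once (sort-then-scan grouping), instead of A's single pass that appends pair by pair into pre-initialised dicts via intermediate swapped-pair lists.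
import Mathlib
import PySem

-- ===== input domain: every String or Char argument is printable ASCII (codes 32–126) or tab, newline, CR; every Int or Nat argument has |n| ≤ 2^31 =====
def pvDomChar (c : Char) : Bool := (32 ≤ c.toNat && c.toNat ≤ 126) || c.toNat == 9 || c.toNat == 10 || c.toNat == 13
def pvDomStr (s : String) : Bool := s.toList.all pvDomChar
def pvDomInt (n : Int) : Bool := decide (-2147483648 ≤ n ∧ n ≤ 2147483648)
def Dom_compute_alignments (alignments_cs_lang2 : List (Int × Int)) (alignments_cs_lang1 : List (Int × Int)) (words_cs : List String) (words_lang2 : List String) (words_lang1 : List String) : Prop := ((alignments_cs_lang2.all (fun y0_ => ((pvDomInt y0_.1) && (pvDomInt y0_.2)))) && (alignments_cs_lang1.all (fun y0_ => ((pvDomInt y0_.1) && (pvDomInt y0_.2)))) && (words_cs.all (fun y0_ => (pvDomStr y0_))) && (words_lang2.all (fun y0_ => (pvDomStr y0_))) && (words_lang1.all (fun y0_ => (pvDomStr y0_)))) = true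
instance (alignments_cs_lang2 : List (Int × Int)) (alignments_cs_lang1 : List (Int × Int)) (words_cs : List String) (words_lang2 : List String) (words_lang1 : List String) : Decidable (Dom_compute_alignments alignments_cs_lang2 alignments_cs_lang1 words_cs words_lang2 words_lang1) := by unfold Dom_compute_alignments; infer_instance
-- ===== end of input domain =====

-- B groups by stable-sorting each pair list on the source index and scanning it run by run
-- (each run's targets assigned at once), instead of A's pair-by-pair appends into
-- pre-initialised dicts via intermediate swapped-pair lists; objective: alternative.

-- ===== PORT A =====
-- {i: [] for i in range(n)}  (the same comprehension appears in both Pythons)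
def pvInitDict (n : Int) : PySem.Dict Int (List Int) :=
  (PySem.List.pyRange 0 n 1).foldl (fun d i => d.insert i ([] : List Int)) PySem.Dict.empty

def compute_alignments (alignments_cs_lang2 : List (Int × Int)) (alignments_cs_lang1 : List (Int × Int)) (words_cs : List String) (words_lang2 : List String) (words_lang1 : List String) : (List (Int × List Int)) × (List (Int × List Int)) × (List (Int × List Int)) × (List (Int × List Int)) :=
  let cs_lang1 := alignments_cs_lang1.foldl
    (fun d p => d.modify p.1 [] (· ++ [p.2])) (pvInitDict (words_cs.length : Int))
  let alignments_lang1_cs := alignments_cs_lang1.map (fun p => (p.2, p.1))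
  let lang1_cs := alignments_lang1_cs.foldl
    (fun d p => d.modify p.1 [] (· ++ [p.2])) (pvInitDict (words_lang1.length : Int))
  let cs_lang2 := alignments_cs_lang2.foldl
    (fun d p => d.modify p.1 [] (· ++ [p.2])) (pvInitDict (words_cs.length : Int))
  let alignments_lang2_cs := alignments_cs_lang2.map (fun p => (p.2, p.1))
  let lang2_cs := alignments_lang2_cs.foldl
    (fun d p => d.modify p.1 [] (· ++ [p.2])) (pvInitDict (words_lang2.length : Int))
  (cs_lang2.items, cs_lang1.items, lang2_cs.items, lang1_cs.items)

-- ===== PORT B =====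
-- inner 'while k < len(s) and s[k][0] == i: k += 1' of Source B's group
def pvRunEnd (s : List (Int × Int)) (i : Int) (k : Nat) : Nat :=
  if h : k < s.length then
    if s[k].1 == i then pvRunEnd s i (k + 1) else k
  else k
termination_by s.length - k

-- termination facts for the outer while loop (cited by pvGroupLoopB's decreasing_by)
theorem pvRunEnd_le (s : List (Int × Int)) (i : Int) (k : Nat) : k ≤ pvRunEnd s i k := by
  rw [pvRunEnd]
  split_ifs with h1 h2
  · exact le_trans (Nat.le_succ k) (pvRunEnd_le s i (k + 1))
  · exact le_refl k
  · exact le_refl k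
termination_by s.length - k

theorem pvRunEnd_lt (s : List (Int × Int)) (k : Nat) (h : k < s.length) :
    k < pvRunEnd s (s[k].1) k := by
  rw [pvRunEnd]
  simp only [h, dif_pos, beq_self_eq_true, if_pos]
  exact Nat.lt_of_lt_of_le (Nat.lt_succ_self k) (pvRunEnd_le s (s[k].1) (k + 1))

-- outer 'while k < len(s): …' of Source B's group: slice out the run s[start:k], assign it at once
def pvGroupLoopB (s : List (Int × Int)) (d : PySem.Dict Int (List Int)) (k : Nat) : PySem.Dict Int (List Int) :=
  if h : k < s.length then
    pvGroupLoopB s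
      (d.modify (s[k].1) []
        (· ++ (PySem.List.slice s (some (k : Int)) (some ((pvRunEnd s (s[k].1) k : Nat) : Int))).map (·.2)))
      (pvRunEnd s (s[k].1) k)
  else d
termination_by s.length - k
decreasing_by have := pvRunEnd_lt s k h; omega

def compute_alignments_alt (alignments_cs_lang2 : List (Int × Int)) (alignments_cs_lang1 : List (Int × Int)) (words_cs : List String) (words_lang2 : List String) (words_lang1 : List String) : (List (Int × List Int)) × (List (Int × List Int)) × (List (Int × List Int)) × (List (Int × List Int)) :=
  ((pvGroupLoopB (PySem.List.sorted alignments_cs_lang2 (fun p => p.1)) (pvInitDict (words_cs.length : Int)) 0).items,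
   (pvGroupLoopB (PySem.List.sorted alignments_cs_lang1 (fun p => p.1)) (pvInitDict (words_cs.length : Int)) 0).items,
   (pvGroupLoopB (PySem.List.sorted (alignments_cs_lang2.map (fun p => (p.2, p.1))) (fun p => p.1)) (pvInitDict (words_lang2.length : Int)) 0).items,
   (pvGroupLoopB (PySem.List.sorted (alignments_cs_lang1.map (fun p => (p.2, p.1))) (fun p => p.1)) (pvInitDict (words_lang1.length : Int)) 0).items)

-- ===== PRECONDITION & SPEC =====
-- Pre_ excludes exactly the inputs on which both Pythons raise KeyError: an alignment pair
-- whose index is not a key of the corresponding pre-initialised dict (out of range).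
def Pre_compute_alignments (alignments_cs_lang2 : List (Int × Int)) (alignments_cs_lang1 : List (Int × Int)) (words_cs : List String) (words_lang2 : List String) (words_lang1 : List String) : Prop :=
  (∀ p ∈ alignments_cs_lang1, 0 ≤ p.1 ∧ p.1 < (words_cs.length : Int) ∧ 0 ≤ p.2 ∧ p.2 < (words_lang1.length : Int)) ∧
  (∀ p ∈ alignments_cs_lang2, 0 ≤ p.1 ∧ p.1 < (words_cs.length : Int) ∧ 0 ≤ p.2 ∧ p.2 < (words_lang2.length : Int))
instance (alignments_cs_lang2 : List (Int × Int)) (alignments_cs_lang1 : List (Int × Int)) (words_cs : List String) (words_lang2 : List String) (words_lang1 : List String) : Decidable (Pre_compute_alignments alignments_cs_lang2 alignments_cs_lang1 words_cs words_lang2 words_lang1) := by unfold Pre_compute_alignments; infer_instance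

def pvWitness_compute_alignments : (List (Int × Int)) × (List (Int × Int)) × List String × List String × List String :=
  ([(0, 1), (0, 0)], [(1, 0), (0, 0), (1, 0)], ["a", "b"], ["x", "y"], ["z"])

def Spec_compute_alignments (alignments_cs_lang2 : List (Int × Int)) (alignments_cs_lang1 : List (Int × Int)) (words_cs : List String) (words_lang2 : List String) (words_lang1 : List String) (out : (List (Int × List Int)) × (List (Int × List Int)) × (List (Int × List Int)) × (List (Int × List Int))) : Prop := out = compute_alignments_alt alignments_cs_lang2 alignments_cs_lang1 words_cs words_lang2 words_lang1
instance (alignments_cs_lang2 : List (Int × Int)) (alignments_cs_lang1 : List (Int × Int)) (words_cs : List String) (words_lang2 : List String) (words_lang1 : List String) (out : (List (Int × List Int)) × (List (Int × List Int)) × (List (Int × List Int)) × (List (Int × List Int))) : Decidable (Spec_compute_alignments alignments_cs_lang2 alignments_cs_lang1 words_cs words_lang2 words_lang1 out) := by unfold Spec_compute_alignments; infer_instance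

-- ===== CLAIM (what is proved, stated in full; the proofs are below) =====
def Claim_equal_compute_alignments : Prop := ∀ (alignments_cs_lang2 : List (Int × Int)) (alignments_cs_lang1 : List (Int × Int)) (words_cs : List String) (words_lang2 : List String) (words_lang1 : List String), Dom_compute_alignments alignments_cs_lang2 alignments_cs_lang1 words_cs words_lang2 words_lang1 → Pre_compute_alignments alignments_cs_lang2 alignments_cs_lang1 words_cs words_lang2 words_lang1 → Spec_compute_alignments alignments_cs_lang2 alignments_cs_lang1 words_cs words_lang2 words_lang1 (compute_alignments alignments_cs_lang2 alignments_cs_lang1 words_cs words_lang2 words_lang1)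

-- ===== LEMMAS AND PROOFS =====
-- A's append-into-preinitialised-dict loop, viewed through .items, is the per-index grouping.
theorem pv_items_fold_eq (pairs : List (Int × Int)) (n : Int)
    (h : ∀ p ∈ pairs, 0 ≤ p.1 ∧ p.1 < n) :
    (pairs.foldl (fun d p => d.modify p.1 [] (· ++ [p.2])) (pvInitDict n)).items
      = (PySem.List.pyRange 0 n 1).map
          (fun i => (i, (pairs.filter (fun p => p.1 == i)).map (·.2))) := by
  have hnd : (PySem.List.pyRange 0 n 1).Nodup := PySem.List.nodup_pyRange_one 0 n
  have hinit_items : (pvInitDict n).items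
      = (PySem.List.pyRange 0 n 1).map (fun i => (i, ([] : List Int))) := by
    have := PySem.Dict.items_foldl_insert_fresh (l := PySem.List.pyRange 0 n 1)
      (k := fun i => i) (v := fun _ => ([] : List Int)) (d := PySem.Dict.empty)
      (by intro a _; simp) (by simpa using hnd)
    simpa [pvInitDict] using this
  have hinit_keys : (pvInitDict n).keys = PySem.List.pyRange 0 n 1 := by
    simp only [PySem.Dict.keys, hinit_items, List.map_map]
    exact List.map_congr_left (fun x _ => rfl) |>.trans (List.map_id _)
  have hkeys : (pairs.foldl (fun d p => d.modify p.1 [] (· ++ [p.2])) (pvInitDict n)).keys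
      = PySem.List.pyRange 0 n 1 := by
    have := PySem.Dict.keys_foldl_modify_key (l := pairs) (key := fun p => p.1)
      (d0 := ([] : List Int)) (f := fun _ p => (· ++ [p.2])) (d := pvInitDict n)
    rw [this, hinit_keys, PySem.Set.update_eq_append_filter]
    have : ((PySem.Set.ofList (pairs.map (fun p => p.1))).filter
        (fun y => !(PySem.Set.contains (PySem.List.pyRange 0 n 1) y))) = [] := by
      apply List.filter_eq_nil_iff.2
      intro x hx
      have hx' : x ∈ pairs.map (fun p => p.1) := (PySem.Set.mem_ofList _ _).1 hx
      obtain ⟨p, hp, rfl⟩ := List.mem_map.1 hx'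
      have := h p hp
      simp [PySem.List.mem_pyRange_one]
      omega
    simp only [this, List.append_nil]
  have hnodup : (pairs.foldl (fun d p => d.modify p.1 [] (· ++ [p.2])) (pvInitDict n)).keys.Nodup := by
    rw [hkeys]; exact hnd
  rw [PySem.Dict.items_eq_map_keys _ hnodup ([] : List Int), hkeys]
  apply List.map_congr_left
  intro i hi
  have hgetD : (pairs.foldl (fun d p => d.modify p.1 [] (· ++ [p.2])) (pvInitDict n)).getD i []
      = (pvInitDict n).getD i [] ++ (pairs.filter (fun p => p.1 == i)).map (·.2) :=
    PySem.Dict.getD_foldl_modify_append pairs (pvInitDict n) i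
  have hinit_getD : (pvInitDict n).getD i [] = [] := by
    apply PySem.Dict.getD_of_mem_items
    · rw [hinit_items]; exact List.mem_map.2 ⟨i, hi, rfl⟩
    · rw [hinit_keys]; exact hnd
  simp [hgetD, hinit_getD]

-- two modifications of the same key compose
theorem pv_modify_modify {d : PySem.Dict Int (List Int)} {k : Int} {d0 : List Int}
    {f g : List Int → List Int} :
    (d.modify k d0 f).modify k d0 g = d.modify k d0 (fun v => g (f v)) := by
  simp [PySem.Dict.modify, PySem.Dict.getD_insert_self, PySem.Dict.insert_insert_self]

-- folding a nonempty constant-key segment is one modification by the whole segment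
theorem pv_foldl_seg (i : Int) (seg : List (Int × Int)) :
    ∀ d : PySem.Dict Int (List Int), seg ≠ [] → (∀ p ∈ seg, p.1 = i) →
      seg.foldl (fun d p => d.modify p.1 [] (· ++ [p.2])) d
        = d.modify i [] (· ++ seg.map (·.2)) := by
  induction seg with
  | nil => intro d hne _; exact absurd rfl hne
  | cons q rest ih =>
    intro d _ hk
    have hq : q.1 = i := hk q (List.mem_cons_self)
    rw [List.foldl_cons]
    by_cases hr : rest = []
    · subst hr; simp [hq]
    · rw [ih (d.modify q.1 [] (· ++ [q.2])) hr (fun p hp => hk p (List.mem_cons_of_mem _ hp)),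
        hq, pv_modify_modify]
      have : (fun v => (v ++ [q.2]) ++ rest.map (·.2))
          = (fun v => v ++ ((q :: rest).map (·.2))) := funext fun v => by simp
      rw [this]

theorem pvRunEnd_le_length (s : List (Int × Int)) (i : Int) (k : Nat) (h : k ≤ s.length) :
    pvRunEnd s i k ≤ s.length := by
  rw [pvRunEnd]
  split_ifs with h1 h2
  · exact pvRunEnd_le_length s i (k + 1) h1
  · exact h
  · exact h
termination_by s.length - k

theorem pvRunEnd_key (s : List (Int × Int)) (i : Int) (k m : Nat) (hm : m < s.length)
    (h1 : k ≤ m) (h2 : m < pvRunEnd s i k) : s[m].1 = i := by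
  rw [pvRunEnd] at h2
  split_ifs at h2 with ha hb
  · by_cases hkm : m = k
    · subst hkm; exact eq_of_beq hb
    · exact pvRunEnd_key s i (k + 1) m hm (by omega) h2
  · omega
  · omega
termination_by s.length - k

-- Source B's run-scan over any list equals the pair-by-pair fold over its tail from k
theorem pv_groupLoop_eq_foldl (s : List (Int × Int)) (k : Nat) (d : PySem.Dict Int (List Int)) :
    pvGroupLoopB s d k
      = (s.drop k).foldl (fun d p => d.modify p.1 [] (· ++ [p.2])) d := by
  rw [pvGroupLoopB]
  split_ifs with h
  · have hlt : k < pvRunEnd s (s[k].1) k := pvRunEnd_lt s k h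
    have hle : pvRunEnd s (s[k].1) k ≤ s.length := pvRunEnd_le_length s (s[k].1) k (le_of_lt h)
    rw [pv_groupLoop_eq_foldl s (pvRunEnd s (s[k].1) k) _]
    have hsplit : s.drop k = (s.drop k).take (pvRunEnd s (s[k].1) k - k) ++ s.drop (pvRunEnd s (s[k].1) k) := by
      conv_lhs => rw [← List.take_append_drop (pvRunEnd s (s[k].1) k - k) (s.drop k)]
      rw [List.drop_drop]
      have h2 : pvRunEnd s (s[k].1) k - k + k = pvRunEnd s (s[k].1) k := by omega
      have h3 : k + (pvRunEnd s (s[k].1) k - k) = pvRunEnd s (s[k].1) k := by omega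
      first
      | rw [h2]
      | rw [h3]
    conv_rhs => rw [hsplit, List.foldl_append]
    congr 1
    have hseglen : ((s.drop k).take (pvRunEnd s (s[k].1) k - k)).length = pvRunEnd s (s[k].1) k - k := by
      rw [List.length_take, List.length_drop]
      omega
    have hmem : ∀ p ∈ (s.drop k).take (pvRunEnd s (s[k].1) k - k), p.1 = s[k].1 := by
      intro p hp
      obtain ⟨m, hm, hpe⟩ := List.mem_iff_getElem.1 hp
      have hm' : m < pvRunEnd s (s[k].1) k - k := by omega
      have hget : ((s.drop k).take (pvRunEnd s (s[k].1) k - k))[m] = s[k + m]'(by omega) := by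
        rw [List.getElem_take, List.getElem_drop]
      rw [← hpe, hget]
      exact pvRunEnd_key s (s[k].1) k (k + m) (by omega) (by omega) (by omega)
    rw [pv_foldl_seg (s[k].1) _ d (by
        intro hnil
        rw [hnil] at hseglen
        simp at hseglen
        omega) hmem]
    rw [PySem.List.slice_natCast]
  · rw [List.drop_eq_nil_of_le (le_of_not_gt h), List.foldl_nil]
termination_by s.length - k
decreasing_by have := pvRunEnd_lt s k h; omega

-- stability of the library sort, seen through one key class: inserting x into a
-- key-sorted list puts it after every element of its own class
theorem pv_filter_insertBy (x : Int × Int) (ys : List (Int × Int)) (c : Int)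
    (hs : ys.Pairwise (fun a b => a.1 ≤ b.1)) :
    (PySem.List.insertBy (fun a b => decide (a.1 < b.1)) x ys).filter (fun p => p.1 == c)
      = if x.1 == c then ys.filter (fun p => p.1 == c) ++ [x]
        else ys.filter (fun p => p.1 == c) := by
  induction ys with
  | nil =>
    simp only [PySem.List.insertBy]
    by_cases hx : x.1 == c <;> simp [hx]
  | cons y ys ih =>
    have htail : ys.Pairwise (fun a b => a.1 ≤ b.1) := (List.pairwise_cons.1 hs).2
    have hhead : ∀ b ∈ ys, y.1 ≤ b.1 := (List.pairwise_cons.1 hs).1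
    have hunf : PySem.List.insertBy (fun a b => decide (a.1 < b.1)) x (y :: ys)
        = if decide (x.1 < y.1) then x :: y :: ys
          else y :: PySem.List.insertBy (fun a b => decide (a.1 < b.1)) x ys := rfl
    rw [hunf]
    by_cases hb : x.1 < y.1
    · rw [if_pos (by simpa using hb)]
      by_cases hx : x.1 == c
      · -- x's whole class is empty in y :: ys, so appending x is prepending it
        have hxc : x.1 = c := eq_of_beq hx
        have hnil : (y :: ys).filter (fun p => p.1 == c) = [] := by
          apply List.filter_eq_nil_iff.2
          intro p hp
          have hyp : y.1 ≤ p.1 := by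
            rcases List.mem_cons.1 hp with rfl | hmem
            · exact le_refl _
            · exact hhead p hmem
          simp only [beq_iff_eq]
          omega
        rw [if_pos hx, hnil, List.filter_cons, if_pos hx, hnil, List.nil_append]
      · rw [if_neg hx, List.filter_cons, if_neg hx]
    · rw [if_neg (by simpa using hb), List.filter_cons, ih htail]
      by_cases hx : x.1 == c <;> by_cases hy : y.1 == c <;>
        simp [hx, hy]

theorem pv_filter_sorted (pairs : List (Int × Int)) (c : Int) :
    (PySem.List.sorted pairs (fun p => p.1)).filter (fun p => p.1 == c)
      = pairs.filter (fun p => p.1 == c) := by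
  induction pairs using List.reverseRecOn with
  | nil => simp [PySem.List.sorted_eq_foldl_insertBy]
  | append_singleton xs x ih =>
    have hstep : PySem.List.sorted (xs ++ [x]) (fun p => p.1)
        = PySem.List.insertBy (fun a b => decide (a.1 < b.1)) x (PySem.List.sorted xs (fun p => p.1)) := by
      rw [PySem.List.sorted_eq_foldl_insertBy, PySem.List.sorted_eq_foldl_insertBy, List.foldl_append,
        List.foldl_cons, List.foldl_nil]
    rw [hstep, pv_filter_insertBy x _ c (PySem.List.sorted_pairwise xs (fun p => p.1)), List.filter_append,
      List.filter_cons, List.filter_nil]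
    by_cases hx : x.1 == c <;> simp [hx, ih]

-- B's group(pairs, n) has the same items as A's fold for in-range pairs
theorem pv_group_alt (pairs : List (Int × Int)) (n : Int)
    (h : ∀ p ∈ pairs, 0 ≤ p.1 ∧ p.1 < n) :
    (pvGroupLoopB (PySem.List.sorted pairs (fun p => p.1)) (pvInitDict n) 0).items
      = (pairs.foldl (fun d p => d.modify p.1 [] (· ++ [p.2])) (pvInitDict n)).items := by
  have hsmem : ∀ p ∈ PySem.List.sorted pairs (fun p => p.1), 0 ≤ p.1 ∧ p.1 < n := by
    intro p hp
    exact h p ((PySem.List.mem_sorted _ _ _ _).1 hp)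
  rw [pv_groupLoop_eq_foldl, List.drop_zero, pv_items_fold_eq _ n hsmem, pv_items_fold_eq _ n h]
  exact List.map_congr_left (fun i _ => by rw [pv_filter_sorted])

-- ===== VERDICT (by name: the statement is the Claim_ definition above) =====
theorem compute_alignments_spec : Claim_equal_compute_alignments := by
  intro al2 al1 wc w2 w1 _ hpre
  obtain ⟨h1, h2⟩ := hpre
  unfold Spec_compute_alignments compute_alignments compute_alignments_alt
  refine congrArg₂ Prod.mk ?_ (congrArg₂ Prod.mk ?_ (congrArg₂ Prod.mk ?_ ?_))
  · exact (pv_group_alt al2 _ (fun p hp => ⟨(h2 p hp).1, (h2 p hp).2.1⟩)).symm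
  · exact (pv_group_alt al1 _ (fun p hp => ⟨(h1 p hp).1, (h1 p hp).2.1⟩)).symm
  · exact (pv_group_alt (al2.map (fun p => (p.2, p.1))) _ (by
      intro p hp
      obtain ⟨q, hq, rfl⟩ := List.mem_map.1 hp
      exact ⟨(h2 q hq).2.2.1, (h2 q hq).2.2.2⟩)).symm
  · exact (pv_group_alt (al1.map (fun p => (p.2, p.1))) _ (by
      intro p hp
      obtain ⟨q, hq, rfl⟩ := List.mem_map.1 hp
      exact ⟨(h1 q hq).2.2.1, (h1 q hq).2.2.2⟩)).symm
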